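-- pv_equiv track=rewrite | github.com/marcosmmb/Raiek | RaiekProject/work.py | hash_validate
-- ===== SOURCE A (Python) =====
-- def hash_validate(_hash): # validates the hash string
-- 	if not isinstance(_hash, str):
-- 		return False
--
-- 	if len(_hash) != 64:
-- 		return False
--
-- 	for c in _hash:
-- 		if not c in ["0","1","2","3","4","5","6","7","8","9","A","B","C","D","E","F"]:
-- 			return False
--
-- 	return True
-- ===== SOURCE B (Python) =====
-- def hash_validate(_hash): # validates the hash string
--     if not isinstance(_hash, str):
--         return False
--     if len(_hash) != 64:
--         return False
--     counts = {}
--     for c in _hash: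
--         counts[c] = counts.get(c, 0) + 1
--     return sum(counts.get(d, 0) for d in "0123456789ABCDEF") == 64
-- ===== Notes on version B (the rewrite author's own statement) =====
-- stated objective: alternative
-- what changed: Replaces A's per-character early-return membership loop with a counting algorithm: one pass builds a character-frequency dictionary, then the string is valid iff the counts of the 16 uppercase hex digits sum to 64 (= the length), so no per-character alphabet test occurs.
import Mathlib
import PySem

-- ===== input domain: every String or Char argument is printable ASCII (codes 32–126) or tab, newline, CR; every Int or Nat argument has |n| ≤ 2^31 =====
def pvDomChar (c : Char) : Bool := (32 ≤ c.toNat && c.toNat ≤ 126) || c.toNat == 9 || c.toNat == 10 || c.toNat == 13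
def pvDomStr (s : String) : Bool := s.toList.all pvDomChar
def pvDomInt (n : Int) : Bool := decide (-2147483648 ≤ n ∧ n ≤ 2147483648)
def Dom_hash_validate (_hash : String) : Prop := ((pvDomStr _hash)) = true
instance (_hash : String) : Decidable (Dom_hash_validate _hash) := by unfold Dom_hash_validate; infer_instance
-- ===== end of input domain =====

-- B replaces A's per-character membership loop with a counting algorithm: a frequency
-- dict built in one pass, then the counts of the 16 hex digits must sum to 64.


-- ===== PORT A =====
-- the literal list A tests membership in
def pyHexDigitList : List Char :=
  ['0','1','2','3','4','5','6','7','8','9','A','B','C','D','E','F']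

-- A's 'for c in _hash: if not c in [...]: return False' loop
def hashLoopA : List Char → Bool
  | [] => true
  | c :: cs => if !(pyHexDigitList.contains c) then false else hashLoopA cs

-- the 'isinstance(_hash, str)' guard is vacuous here: the argument is typed String
def hash_validate (_hash : String) : Bool :=
  if PySem.Str.len _hash ≠ 64 then false
  else hashLoopA _hash.toList

-- ===== PORT B =====
def hexUpper : String := "0123456789ABCDEF"

def hash_validate_alt (_hash : String) : Bool :=
  if PySem.Str.len _hash ≠ 64 then false
  else
    -- counts[c] = counts.get(c, 0) + 1 over the string
    let counts := _hash.toList.foldl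
      (fun d c => d.insert c (d.getD c 0 + 1)) (PySem.Dict.empty (κ := Char) (ν := Int))
    -- sum(counts.get(d, 0) for d in "0123456789ABCDEF") == 64
    (hexUpper.toList.map (fun d => counts.getD d 0)).sum == 64

-- ===== PRECONDITION & SPEC =====
def Spec_hash_validate (_hash : String) (out : Bool) : Prop := out = hash_validate_alt _hash
instance (_hash : String) (out : Bool) : Decidable (Spec_hash_validate _hash out) := by unfold Spec_hash_validate; infer_instance

-- ===== CLAIM (what is proved, stated in full; the proofs are below) =====
def Claim_equal_hash_validate : Prop := ∀ (_hash : String), Dom_hash_validate _hash → Spec_hash_validate _hash (hash_validate _hash)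

-- ===== LEMMAS AND PROOFS =====

-- A's early-return loop accepts exactly when every char is a hex digit
theorem hashLoopA_eq_all (cs : List Char) :
    hashLoopA cs = cs.all (fun c => pyHexDigitList.contains c) := by
  induction cs with
  | nil => rfl
  | cons c cs ih =>
    by_cases h : pyHexDigitList.contains c = true <;>
      simp [hashLoopA, ih]

-- a 0/1 indicator summed over a duplicate-free list
theorem sum_indicator (c : Char) (ds : List Char) (hnd : ds.Nodup) :
    (ds.map (fun d => if d = c then (1 : Int) else 0)).sum
      = if c ∈ ds then (1 : Int) else 0 := by
  induction ds with
  | nil => simp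
  | cons e es ihe =>
    have hnd' : es.Nodup := (List.nodup_cons.mp hnd).2
    by_cases h : e = c
    · subst h
      have hne : e ∉ es := (List.nodup_cons.mp hnd).1
      have hz : (es.map (fun d => if d = e then (1 : Int) else 0)).sum = 0 := by
        apply List.sum_eq_zero
        intro x hx
        simp only [List.mem_map] at hx
        obtain ⟨d, hd, hdx⟩ := hx
        have hdc : ¬ d = e := fun he => hne (he ▸ hd)
        rw [if_neg hdc] at hdx
        exact hdx.symm
      simp [hz]
    · simp only [List.map_cons, List.sum_cons, if_neg h, ihe hnd', zero_add,
        List.mem_cons]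
      have : (c = e ∨ c ∈ es) ↔ c ∈ es := by
        constructor
        · rintro (rfl | hm)
          · exact absurd rfl h
          · exact hm
        · exact Or.inr
      simp [this]

-- the counts of the distinct digits in ds sum to the number of chars of cs lying in ds
theorem sum_counts_eq_countP (ds : List Char) (hnd : ds.Nodup) (cs : List Char) :
    (ds.map (fun d => (cs.count d : Int))).sum = (cs.countP (fun c => ds.contains c) : Int) := by
  induction cs with
  | nil => simp
  | cons c cs ih =>
    have hsplit : (ds.map (fun d => ((c :: cs).count d : Int))).sum
        = ((ds.map (fun d => (cs.count d : Int))).sum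
          + (ds.map (fun d => if d = c then (1 : Int) else 0)).sum) := by
      rw [← List.sum_map_add]
      apply congrArg
      apply List.map_congr_left
      intro d _
      rw [List.count_cons]
      by_cases h : d = c
      · subst h; simp
      · have h2 : ¬ c = d := fun hc => h hc.symm
        simp [h, h2]
    rw [hsplit, ih, sum_indicator c ds hnd, List.countP_cons]
    by_cases h : c ∈ ds <;>
      simp [List.contains_eq_mem, h]

theorem hex_chars_eq : hexUpper.toList = pyHexDigitList := by decide

theorem hexNodup : pyHexDigitList.Nodup := by decide

-- ===== VERDICT (by name: the statement is the Claim_ definition above) =====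
theorem hash_validate_spec : Claim_equal_hash_validate := by
  intro h _dom
  unfold Spec_hash_validate hash_validate hash_validate_alt
  by_cases hl : PySem.Str.len h = 64
  · rw [if_neg (not_not_intro hl), if_neg (not_not_intro hl)]
    have hget : ∀ d, ((h.toList.foldl
        (fun d c => d.insert c (d.getD c 0 + 1)) (PySem.Dict.empty (κ := Char) (ν := Int))).getD d 0)
        = (h.toList.count d : Int) := by
      intro d
      rw [PySem.Dict.getD_foldl_insert_add_one]
      simp [PySem.Dict.empty, PySem.Dict.getD, PySem.Dict.get?]
    have hsum : (hexUpper.toList.map (fun d =>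
        (h.toList.foldl (fun d c => d.insert c (d.getD c 0 + 1))
          (PySem.Dict.empty (κ := Char) (ν := Int))).getD d 0)).sum
        = (h.toList.countP (fun c => pyHexDigitList.contains c) : Int) := by
      rw [hex_chars_eq, ← sum_counts_eq_countP pyHexDigitList hexNodup h.toList]
      exact congrArg _ (List.map_congr_left (fun d _ => hget d))
    rw [hashLoopA_eq_all]
    simp only [hsum]
    have hlen : h.toList.length = 64 := by
      have := hl
      simp only [PySem.Str.len_eq] at this
      exact_mod_cast this
    rcases hall : h.toList.all (fun c => pyHexDigitList.contains c) with _ | _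
    · symm
      rw [beq_eq_false_iff_ne]
      intro hc
      have hnat : h.toList.countP (fun c => pyHexDigitList.contains c) = 64 := by
        exact_mod_cast hc
      have heq : h.toList.countP (fun c => pyHexDigitList.contains c) = h.toList.length := by
        rw [hlen, hnat]
      rw [List.countP_eq_length] at heq
      rw [List.all_eq_false] at hall
      obtain ⟨c, hmem, hnc⟩ := hall
      exact hnc (heq c hmem)
    · symm
      rw [beq_iff_eq]
      have : h.toList.countP (fun c => pyHexDigitList.contains c) = h.toList.length := by
        rw [List.countP_eq_length]
        rw [List.all_eq_true] at hall
        exact hall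
      rw [this, hlen]; rfl
  · rw [if_pos hl, if_pos hl]
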